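-- pv_equiv track=rewrite | github.com/angelalopezcardona/vlfeedback_dev | attention/models/visual_processer.py | _find_single_block
-- ===== SOURCE A (Python) =====
-- from typing import List, Dict, Tuple, Optional
-- from typing import Dict, Tuple
-- from typing import Dict, Tuple, Optional
--
-- def _find_single_block(ids: List[int], image_tid: int) -> Tuple[int, int]:
--     """Return (start, length) of the ONLY <image> block; raises if 0 or >1 blocks."""
--     n = len(ids)
--     blocks = []
--     i = 0
--     while i < n:
--         if ids[i] == image_tid:
--             j = i
--             while j < n and ids[j] == image_tid:
--                 j += 1
--             blocks.append((i, j - i))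
--             i = j
--         else:
--             i += 1
--     if len(blocks) == 0:
--         raise ValueError("No <image> block found in input_ids.")
--     if len(blocks) > 1:
--         raise ValueError("Multiple <image> blocks found; this helper assumes exactly one image.")
--     return blocks[0]
-- ===== SOURCE B (Python) =====
-- def _find_single_block(ids, image_tid):
--     """Return (start, length) of the ONLY <image> block; raises if 0 or >1 blocks."""
--     pos = [i for i, x in enumerate(ids) if x == image_tid]
--     if not pos:
--         raise ValueError("No <image> block found in input_ids.")
--     if pos[-1] - pos[0] + 1 != len(pos):
--         raise ValueError("Multiple <image> blocks found; this helper assumes exactly one image.")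
--     return (pos[0], len(pos))
-- ===== Notes on version B (the rewrite author's own statement) =====
-- stated objective: simpler
-- what changed: Replaces the nested while-loop run-scanner that accumulates a list of blocks with a single comprehension collecting the token's positions plus an arithmetic contiguity check (last - first + 1 == count).
import Mathlib
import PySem

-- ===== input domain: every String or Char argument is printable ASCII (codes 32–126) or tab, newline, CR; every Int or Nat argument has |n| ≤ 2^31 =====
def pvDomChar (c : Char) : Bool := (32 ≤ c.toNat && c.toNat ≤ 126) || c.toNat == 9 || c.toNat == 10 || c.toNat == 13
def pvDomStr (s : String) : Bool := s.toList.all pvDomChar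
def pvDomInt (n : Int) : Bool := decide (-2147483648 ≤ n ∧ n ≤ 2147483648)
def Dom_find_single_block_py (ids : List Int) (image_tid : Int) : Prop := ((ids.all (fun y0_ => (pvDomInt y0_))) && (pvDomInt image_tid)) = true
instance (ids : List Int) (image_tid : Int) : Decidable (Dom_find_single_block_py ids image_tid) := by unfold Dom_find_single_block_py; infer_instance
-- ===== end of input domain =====

-- B replaces A's nested while-loop block scanner with a one-pass position list and an
-- arithmetic contiguity check; the equivalence below is about the return value on the
-- inputs where A returns (both programs raise identical ValueErrors elsewhere).

-- ===== PORT A =====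
-- inner while loop: 'while j < n and ids[j] == image_tid: j += 1'
def pvAInner (ids : List Int) (tid n j : Int) : Int :=
  if h : j < n ∧ PySem.List.pyGet? ids j = some tid then
    pvAInner ids tid n (j + 1)
  else j
termination_by (n - j).toNat
decreasing_by omega

-- (termination facts for the outer loop; the port cites pvAInner_gt in decreasing_by)
lemma pvAInner_ge (ids : List Int) (tid n j : Int) : j ≤ pvAInner ids tid n j := by
  fun_induction pvAInner <;> omega

lemma pvAInner_gt (ids : List Int) (tid n j : Int) (h1 : j < n)
    (h2 : PySem.List.pyGet? ids j = some tid) : j + 1 ≤ pvAInner ids tid n j := by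
  rw [pvAInner, dif_pos ⟨h1, h2⟩]
  exact pvAInner_ge ids tid n (j + 1)

-- outer while loop accumulating 'blocks'
def pvAOuter (ids : List Int) (tid n i : Int) (blocks : List (Int × Int)) : List (Int × Int) :=
  if h : i < n then
    if ht : PySem.List.pyGet? ids i = some tid then
      pvAOuter ids tid n (pvAInner ids tid n i) (blocks ++ [(i, pvAInner ids tid n i - i)])
    else
      pvAOuter ids tid n (i + 1) blocks
  else blocks
termination_by (n - i).toNat
decreasing_by
  · have := pvAInner_gt ids tid n i h ht; omega
  · omega

def find_single_block_py (ids : List Int) (image_tid : Int) : Int × Int :=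
  let n : Int := ids.length
  let blocks := pvAOuter ids image_tid n 0 []
  if blocks.length = 0 then (0, 0)          -- Python: raise ValueError "No <image> block…"
  else if blocks.length > 1 then (0, 0)     -- Python: raise ValueError "Multiple <image> blocks…"
  else blocks.headD (0, 0)                  -- blocks[0]

-- ===== PORT B =====
def find_single_block_py_alt (ids : List Int) (image_tid : Int) : Int × Int :=
  let pos : List Int := (PySem.List.enumerate ids 0).filterMap
      (fun p => if p.2 = image_tid then some p.1 else none)
  if pos.isEmpty then (0, 0)                                              -- raise: no block
  else if pos.getLastD 0 - pos.headD 0 + 1 ≠ (pos.length : Int) then (0, 0)  -- raise: multiple blocks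
  else (pos.headD 0, (pos.length : Int))

-- ===== PRECONDITION & SPEC =====
-- the indices of ids holding image_tid
def pvPos (ids : List Int) (tid : Int) : List Nat :=
  (List.range ids.length).filter (fun i => ids.getD i 0 == tid)

-- Pre_ excludes exactly the inputs where A raises ValueError (no image token, or the image
-- tokens do not form one contiguous run); B raises the identical errors there.
def Pre_find_single_block_py (ids : List Int) (image_tid : Int) : Prop :=
  pvPos ids image_tid ≠ [] ∧
  pvPos ids image_tid =
    List.range' ((pvPos ids image_tid).headD 0) (pvPos ids image_tid).length
instance (ids : List Int) (image_tid : Int) : Decidable (Pre_find_single_block_py ids image_tid) := by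
  unfold Pre_find_single_block_py; infer_instance

def pvWitness_find_single_block_py : List Int × Int := ([2, 5, 5, 3], 5)

def Spec_find_single_block_py (ids : List Int) (image_tid : Int) (out : Int × Int) : Prop := out = find_single_block_py_alt ids image_tid
instance (ids : List Int) (image_tid : Int) (out : Int × Int) : Decidable (Spec_find_single_block_py ids image_tid out) := by unfold Spec_find_single_block_py; infer_instance

-- ===== CLAIM (what is proved, stated in full; the proofs are below) =====
def Claim_equal_find_single_block_py : Prop := ∀ (ids : List Int) (image_tid : Int), Dom_find_single_block_py ids image_tid → Pre_find_single_block_py ids image_tid → Spec_find_single_block_py ids image_tid (find_single_block_py ids image_tid)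

-- ===== LEMMAS AND PROOFS =====

lemma mem_pvPos (ids : List Int) (tid : Int) (i : Nat) :
    i ∈ pvPos ids tid ↔ ids[i]? = some tid := by
  simp only [pvPos, List.mem_filter, List.mem_range, beq_iff_eq, List.getD_eq_getElem?_getD]
  constructor
  · rintro ⟨h1, h2⟩
    rw [List.getElem?_eq_getElem h1] at h2 ⊢
    simpa using h2
  · intro h
    rcases List.getElem?_eq_some_iff.mp h with ⟨h1, h2⟩
    refine ⟨h1, ?_⟩
    simp [h]

-- the inner loop consumes exactly the run [a, a+k)
lemma pvAInner_run (ids : List Int) (tid : Int) (a k : Nat)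
    (hmem : ∀ m : Nat, ids[m]? = some tid ↔ a ≤ m ∧ m < a + k) :
    ∀ (d : Nat) (j : Int), (a : Int) ≤ j → j + d = (a : Int) + k →
      pvAInner ids tid (ids.length : Int) j = (a : Int) + k := by
  intro d
  induction d with
  | zero =>
    intro j h1 h2
    rw [pvAInner, dif_neg]
    · omega
    · rintro ⟨hlt, hget⟩
      have h0 : 0 ≤ j := by omega
      rw [PySem.List.pyGet?_of_nonneg ids h0] at hget
      have := (hmem j.toNat).mp hget
      omega
  | succ d ih =>
    intro j h1 h2
    have h0 : 0 ≤ j := by omega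
    have hget : ids[j.toNat]? = some tid := (hmem j.toNat).mpr (by omega)
    have hlen : j < (ids.length : Int) := by
      rcases List.getElem?_eq_some_iff.mp hget with ⟨hlt, -⟩
      omega
    rw [pvAInner, dif_pos ⟨hlen, by rw [PySem.List.pyGet?_of_nonneg ids h0]; exact hget⟩]
    exact ih (j + 1) (by omega) (by omega)

lemma pvAOuter_tail (ids : List Int) (tid : Int) (a k : Nat)
    (hmem : ∀ m : Nat, ids[m]? = some tid ↔ a ≤ m ∧ m < a + k) :
    ∀ (d : Nat) (i : Int) (blocks : List (Int × Int)), (a : Int) + k ≤ i →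
      i + d = (ids.length : Int) →
      pvAOuter ids tid (ids.length : Int) i blocks = blocks := by
  intro d
  induction d with
  | zero =>
    intro i blocks h1 h2
    rw [pvAOuter, dif_neg (by omega)]
  | succ d ih =>
    intro i blocks h1 h2
    have h0 : 0 ≤ i := by omega
    have hne : ¬ PySem.List.pyGet? ids i = some tid := by
      rw [PySem.List.pyGet?_of_nonneg ids h0]
      intro hget
      have := (hmem i.toNat).mp hget
      omega
    rw [pvAOuter, dif_pos (by omega : i < (ids.length : Int)), dif_neg hne]
    exact ih (i + 1) blocks (by omega) (by omega)

lemma pvAOuter_head (ids : List Int) (tid : Int) (a k : Nat)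
    (hmem : ∀ m : Nat, ids[m]? = some tid ↔ a ≤ m ∧ m < a + k)
    (hk : 0 < k) (hn : a + k ≤ ids.length) :
    ∀ (d : Nat) (i : Int) (blocks : List (Int × Int)), 0 ≤ i → i + d = (a : Int) →
      pvAOuter ids tid (ids.length : Int) i blocks = blocks ++ [((a : Int), (k : Int))] := by
  intro d
  induction d with
  | zero =>
    intro i blocks h0 h2
    have hi : i = (a : Int) := by omega
    subst hi
    have hcond : PySem.List.pyGet? ids ((a : Nat) : Int) = some tid := by
      rw [PySem.List.pyGet?_of_nonneg ids (Int.natCast_nonneg a)]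
      simpa using (hmem a).mpr (by omega)
    rw [pvAOuter, dif_pos (by omega : ((a : Nat) : Int) < (ids.length : Int)), dif_pos hcond]
    have hin : pvAInner ids tid (ids.length : Int) (a : Int) = (a : Int) + k :=
      pvAInner_run ids tid a k hmem k (a : Int) le_rfl rfl
    rw [hin, pvAOuter_tail ids tid a k hmem (ids.length - (a + k)) _ _ (by omega) (by omega)]
    norm_num
  | succ d ih =>
    intro i blocks h0 h2
    have hne : ¬ PySem.List.pyGet? ids i = some tid := by
      rw [PySem.List.pyGet?_of_nonneg ids h0]
      intro hget
      have := (hmem i.toNat).mp hget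
      omega
    rw [pvAOuter, dif_pos (by omega : i < (ids.length : Int)), dif_neg hne]
    exact ih (i + 1) blocks (by omega) (by omega)

-- B's position comprehension equals pvPos (shifted by the enumerate start)
lemma pos_eq_map_pvPos (tid : Int) :
    ∀ (ids : List Int) (s : Nat),
      (PySem.List.enumerate ids (s : Int)).filterMap
        (fun p => if p.2 = tid then some p.1 else none)
      = ((List.range ids.length).filter (fun i => ids.getD i 0 == tid)).map
          (fun i => ((s + i : Nat) : Int)) := by
  intro ids
  induction ids with
  | nil => intro s; simp [PySem.List.enumerate]
  | cons x xs ih =>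
    intro s
    have e1 : ((s : Int) + 1) = ((s + 1 : Nat) : Int) := by push_cast; ring
    rw [PySem.List.enumerate_cons, List.filterMap_cons, e1, ih (s + 1), List.length_cons,
      List.range_succ_eq_map, List.filter_cons]
    simp only [List.getD_cons_zero, List.filter_map, Function.comp_def, List.getD_cons_succ,
      Nat.succ_eq_add_one]
    by_cases hx : x = tid
    · simp [hx, Function.comp_def]
      intros
      omega
    · simp [hx, Function.comp_def]
      intros
      omega

lemma getLastD_map_range' (f : Nat → Int) :
    ∀ (k a : Nat) (d : Int), ((List.range' a (k + 1)).map f).getLastD d = f (a + k) := by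
  intro k
  induction k with
  | zero => intro a d; simp [List.range'_one]
  | succ k ih =>
    intro a d
    rw [List.range'_succ, List.map_cons, List.getLastD_cons, ih (a + 1) (f a)]
    congr 1
    omega

-- ===== VERDICT (by name: the statement is the Claim_ definition above) =====
theorem find_single_block_py_spec : Claim_equal_find_single_block_py := by
  intro ids tid hdom hpre
  obtain ⟨hne, heqq⟩ := hpre
  obtain ⟨a, k', heq⟩ : ∃ a k', pvPos ids tid = List.range' a (k' + 1) := by
    have hlen0 : (pvPos ids tid).length ≠ 0 := fun h => hne (List.length_eq_zero_iff.mp h)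
    refine ⟨(pvPos ids tid).headD 0, (pvPos ids tid).length - 1, ?_⟩
    conv_lhs => rw [heqq]
    congr 1
    omega
  have hmem : ∀ m : Nat, ids[m]? = some tid ↔ a ≤ m ∧ m < a + (k' + 1) := by
    intro m
    rw [← mem_pvPos, heq, List.mem_range'_1]
  have hn : a + (k' + 1) ≤ ids.length := by
    have hm : a + k' ∈ pvPos ids tid := by
      rw [heq, List.mem_range'_1]; omega
    rcases List.getElem?_eq_some_iff.mp ((mem_pvPos ids tid _).mp hm) with ⟨hlt, -⟩
    omega
  have hA : pvAOuter ids tid (ids.length : Int) 0 [] = [((a : Int), ((k' + 1 : Nat) : Int))] :=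
    pvAOuter_head ids tid a (k' + 1) hmem (by omega) hn a 0 [] le_rfl (by omega)
  have hB : (PySem.List.enumerate ids (0 : Int)).filterMap
      (fun p => if p.2 = tid then some p.1 else none)
      = (List.range' a (k' + 1)).map (fun i : Nat => (i : Int)) := by
    have h0 := pos_eq_map_pvPos tid ids 0
    rw [show (((0 : Nat) : Int)) = (0 : Int) by simp] at h0
    have hpv : ((List.range ids.length).filter (fun i => ids.getD i 0 == tid)) = pvPos ids tid := rfl
    rw [hpv, heq] at h0
    rw [h0]
    apply List.map_congr_left
    intro i _
    omega
  have hlast : (List.map (fun i : Nat => (i : Int)) (List.range' (a + 1) k')).getLastD (a : Int)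
      = ((a + k' : Nat) : Int) := by
    cases k' with
    | zero => simp
    | succ m =>
      rw [getLastD_map_range' (fun i : Nat => (i : Int)) m (a + 1) (a : Int)]
      congr 1
      omega
  simp only [Spec_find_single_block_py, find_single_block_py, find_single_block_py_alt]
  rw [hA, hB, List.range'_succ, List.map_cons]
  simp only [List.isEmpty_cons, List.headD_cons, List.getLastD_cons, hlast, List.length_cons,
    List.length_map, List.length_range', List.length_nil]
  norm_num
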